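-- pv_equiv track=rewrite | github.com/os-autoinst/os-autoinst-distri-opensuse | data/virt_autotest/create_host_bridge.py | getValidInterfaceInfo
-- ===== SOURCE A (Python) =====
-- def getValidInterfaceInfo(interfaceinfo, filters):
--     valid_interface, bridge = [], []
--     for dname, macaddr, ipaddr in interfaceinfo:
--         if macaddr not in filters:
--             if dname.startswith('br'):
--                 bridge.append((dname, ipaddr))
--             else:
--                 valid_interface.append((dname, ipaddr))
--
--     if not valid_interface and not bridge:
--         return None, None
--
--     if not valid_interface:
--         return bridge[0]
--
--     return valid_interface[0]
-- ===== SOURCE B (Python) =====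
-- def getValidInterfaceInfo(interfaceinfo, filters):
--     first_bridge = None
--     for dname, macaddr, ipaddr in interfaceinfo:
--         if macaddr in filters:
--             continue
--         if not dname.startswith('br'):
--             return dname, ipaddr
--         if first_bridge is None:
--             first_bridge = (dname, ipaddr)
--     if first_bridge is not None:
--         return first_bridge
--     return None, None
-- ===== Notes on version B (the rewrite author's own statement) =====
-- stated objective: faster
-- what changed: Single pass with an early return on the first non-bridge interface and one remembered first bridge, instead of building two full lists and indexing them afterwards.
import Mathlib
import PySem

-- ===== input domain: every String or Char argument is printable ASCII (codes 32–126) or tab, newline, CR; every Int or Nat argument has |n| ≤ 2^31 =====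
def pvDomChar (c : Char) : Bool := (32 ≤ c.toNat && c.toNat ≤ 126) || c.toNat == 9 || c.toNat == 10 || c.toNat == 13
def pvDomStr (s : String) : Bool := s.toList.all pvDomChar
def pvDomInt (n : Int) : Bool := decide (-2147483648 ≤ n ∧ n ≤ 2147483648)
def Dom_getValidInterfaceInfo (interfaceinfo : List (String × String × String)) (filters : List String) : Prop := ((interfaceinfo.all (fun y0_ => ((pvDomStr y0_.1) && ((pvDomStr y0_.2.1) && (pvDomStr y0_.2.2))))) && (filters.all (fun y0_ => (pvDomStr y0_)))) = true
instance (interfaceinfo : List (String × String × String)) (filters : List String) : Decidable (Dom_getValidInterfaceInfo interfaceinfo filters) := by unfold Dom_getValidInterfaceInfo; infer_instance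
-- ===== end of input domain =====

-- B replaces A's two accumulated lists + post-hoc indexing by a single pass with an early
-- return on the first non-bridge interface and one remembered first bridge (objective: simpler).


-- ===== PORT A =====
-- A: one loop appending to two lists (valid_interface, bridge), then select by emptiness / index 0.
def getValidInterfaceInfo (interfaceinfo : List (String × String × String)) (filters : List String) : Option String × Option String :=
  let acc := interfaceinfo.foldl (fun (acc : List (String × String) × List (String × String)) t =>
    if ¬ (t.2.1 ∈ filters) then
      if PySem.Str.startswith t.1 "br" then (acc.1, acc.2 ++ [(t.1, t.2.2)])
      else (acc.1 ++ [(t.1, t.2.2)], acc.2)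
    else acc) ([], [])
  match acc.1, acc.2 with
  | [], [] => (none, none)
  | [], b :: _ => (some b.1, some b.2)   -- bridge[0]
  | v :: _, _ => (some v.1, some v.2)    -- valid_interface[0]

-- ===== PORT B =====
-- B: single pass; early return on first non-bridge interface, remember first bridge only.
def getValidInterfaceInfoGoB (filters : List String) (fb : Option (String × String)) :
    List (String × String × String) → Option String × Option String
  | [] =>
    match fb with
    | some b => (some b.1, some b.2)
    | none => (none, none)
  | (dname, macaddr, ipaddr) :: rest =>
    if macaddr ∈ filters then getValidInterfaceInfoGoB filters fb rest
    else if ¬ PySem.Str.startswith dname "br" then (some dname, some ipaddr)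
    else getValidInterfaceInfoGoB filters (match fb with | none => some (dname, ipaddr) | some b => some b) rest

def getValidInterfaceInfo_alt (interfaceinfo : List (String × String × String)) (filters : List String) : Option String × Option String :=
  getValidInterfaceInfoGoB filters none interfaceinfo

-- ===== PRECONDITION & SPEC =====
def Spec_getValidInterfaceInfo (interfaceinfo : List (String × String × String)) (filters : List String) (out : Option String × Option String) : Prop := out = getValidInterfaceInfo_alt interfaceinfo filters
instance (interfaceinfo : List (String × String × String)) (filters : List String) (out : Option String × Option String) : Decidable (Spec_getValidInterfaceInfo interfaceinfo filters out) := by unfold Spec_getValidInterfaceInfo; infer_instance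

-- ===== CLAIM (what is proved, stated in full; the proofs are below) =====
def Claim_equal_getValidInterfaceInfo : Prop := ∀ (interfaceinfo : List (String × String × String)) (filters : List String), Dom_getValidInterfaceInfo interfaceinfo filters → Spec_getValidInterfaceInfo interfaceinfo filters (getValidInterfaceInfo interfaceinfo filters)

-- ===== LEMMAS AND PROOFS =====

-- the selection A performs on its two finished lists
def pvSelA (va bl : List (String × String)) : Option String × Option String :=
  match va, bl with
  | [], [] => (none, none)
  | [], b :: _ => (some b.1, some b.2)
  | v :: _, _ => (some v.1, some v.2)

-- Invariant: running A's loop from accumulators (va, bl) and then selecting equals B's loop,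
-- where B's remembered bridge is bl.head? — provided va is empty; if va is nonempty the result
-- is already pinned to va's head.
theorem pv_inv (filters : List String) :
    ∀ (xs : List (String × String × String)) (va bl : List (String × String)),
      pvSelA (xs.foldl (fun (acc : List (String × String) × List (String × String)) t =>
        if ¬ (t.2.1 ∈ filters) then
          if PySem.Str.startswith t.1 "br" then (acc.1, acc.2 ++ [(t.1, t.2.2)])
          else (acc.1 ++ [(t.1, t.2.2)], acc.2)
        else acc) (va, bl)).1
        ((xs.foldl (fun (acc : List (String × String) × List (String × String)) t =>
        if ¬ (t.2.1 ∈ filters) then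
          if PySem.Str.startswith t.1 "br" then (acc.1, acc.2 ++ [(t.1, t.2.2)])
          else (acc.1 ++ [(t.1, t.2.2)], acc.2)
        else acc) (va, bl)).2) =
      match va with
      | v :: _ => (some v.1, some v.2)
      | [] => getValidInterfaceInfoGoB filters bl.head? xs := by
  intro xs
  induction xs with
  | nil =>
    intro va bl
    cases va with
    | nil => cases bl <;> simp [pvSelA, getValidInterfaceInfoGoB]
    | cons v t => simp [pvSelA]
  | cons hd tl ih =>
    intro va bl
    obtain ⟨d, m, i⟩ := hd
    by_cases hm : m ∈ filters
    · simp only [List.foldl_cons, hm, not_true_eq_false, if_false,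
        getValidInterfaceInfoGoB]
      exact ih va bl
    · by_cases hbr : PySem.Str.startswith d "br"
      · simp only [List.foldl_cons, hm, not_false_eq_true, if_true, hbr,
          getValidInterfaceInfoGoB, not_true_eq_false, if_false]
        have := ih va (bl ++ [(d, i)])
        cases va with
        | cons v t => simpa using this
        | nil =>
          cases bl with
          | nil => simpa using this
          | cons b bt => simpa using this
      · simp only [List.foldl_cons, hm, not_false_eq_true, if_true, hbr, if_false,
          getValidInterfaceInfoGoB, not_false_eq_true, if_true]
        cases va with
        | cons v t => simpa using ih (v :: t ++ [(d, i)]) bl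
        | nil => simpa using ih [(d, i)] bl

-- ===== VERDICT (by name: the statement is the Claim_ definition above) =====
theorem getValidInterfaceInfo_spec : Claim_equal_getValidInterfaceInfo := by
  intro interfaceinfo filters _
  unfold Spec_getValidInterfaceInfo getValidInterfaceInfo getValidInterfaceInfo_alt
  simpa [pvSelA] using pv_inv filters interfaceinfo [] []
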